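-- pv_equiv track=rewrite | github.com/angsh-d/patient-access-services | backend/evaluation/eval_runner.py | _statuses_match
-- ===== SOURCE A (Python) =====
-- from typing import Dict, Any, List, Optional, Tuple
--
-- def _statuses_match(predicted: Optional[str], expected: str) -> bool:
--     """Check if predicted coverage status matches expected.
--
--     Allows semantic equivalence: the conservative decision model maps
--     NOT_COVERED -> REQUIRES_HUMAN_REVIEW, so we treat both as equivalent
--     when the expected is requires_human_review.
--     """
--     if predicted is None:
--         return False
--     pred = predicted.lower().strip()
--     exp = expected.lower().strip()
--     if pred == exp:
--         return True
--     # Conservative model equivalences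
--     equivalent_groups = [
--         {"requires_human_review", "not_covered"},
--         {"covered", "likely_covered"},
--         {"pend", "conditional"},
--     ]
--     for group in equivalent_groups:
--         if pred in group and exp in group:
--             return True
--     return False
-- ===== SOURCE B (Python) =====
-- # Canonical-representative table built once: each status maps to its group's
-- # representative; unknown statuses map to themselves, so plain equality remains.
-- _CANON = {
--     "requires_human_review": "not_covered",
--     "not_covered": "not_covered",
--     "covered": "covered",
--     "likely_covered": "covered",
--     "pend": "conditional",
--     "conditional": "conditional",
-- }
--
-- def _statuses_match(predicted, expected):
--     if predicted is None:
--         return False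
--     pred = predicted.lower().strip()
--     exp = expected.lower().strip()
--     return _CANON.get(pred, pred) == _CANON.get(exp, exp)
-- ===== Notes on version B (the rewrite author's own statement) =====
-- stated objective: simpler
-- what changed: Replaces the pred==exp shortcut plus the loop over equivalence-group sets with a single precomputed canonical-representative table and one lookup-based comparison canon.get(pred,pred) == canon.get(exp,exp).
import Mathlib
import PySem

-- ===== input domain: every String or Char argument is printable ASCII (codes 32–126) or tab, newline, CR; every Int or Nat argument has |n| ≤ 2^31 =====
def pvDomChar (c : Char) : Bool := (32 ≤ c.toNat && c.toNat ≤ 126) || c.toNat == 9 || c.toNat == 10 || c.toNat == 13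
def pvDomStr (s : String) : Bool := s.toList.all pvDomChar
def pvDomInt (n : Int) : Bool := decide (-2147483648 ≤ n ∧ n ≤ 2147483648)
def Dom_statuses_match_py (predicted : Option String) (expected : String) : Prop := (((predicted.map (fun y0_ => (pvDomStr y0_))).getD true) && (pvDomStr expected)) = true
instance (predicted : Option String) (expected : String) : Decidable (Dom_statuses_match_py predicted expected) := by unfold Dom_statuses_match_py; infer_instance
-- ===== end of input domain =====

-- B replaces the pred==exp shortcut plus the loop over equivalence-group sets with one
-- precomputed canonical-representative table and a single lookup comparison (simpler).

-- ===== PORT A =====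
def pvGroupsA : List (PySem.Set String) :=
  [PySem.Set.ofList ["requires_human_review", "not_covered"],
   PySem.Set.ofList ["covered", "likely_covered"],
   PySem.Set.ofList ["pend", "conditional"]]

-- the early-return 'for group in equivalent_groups' loop
def pvLoopA : List (PySem.Set String) → String → String → Bool
  | [], _, _ => false
  | g :: rest, pred, exp =>
      if g.contains pred && g.contains exp then true else pvLoopA rest pred exp

def statuses_match_py (predicted : Option String) (expected : String) : Bool :=
  match predicted with
  | none => false
  | some p =>
      let pred := PySem.Str.strip (PySem.Str.lower p)
      let exp := PySem.Str.strip (PySem.Str.lower expected)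
      if pred == exp then true
      else pvLoopA pvGroupsA pred exp

-- ===== PORT B =====
def pvCanon : PySem.Dict String String :=
  PySem.Dict.ofList
    [("requires_human_review", "not_covered"), ("not_covered", "not_covered"),
     ("covered", "covered"), ("likely_covered", "covered"),
     ("pend", "conditional"), ("conditional", "conditional")]

def statuses_match_py_alt (predicted : Option String) (expected : String) : Bool :=
  match predicted with
  | none => false
  | some p =>
      let pred := PySem.Str.strip (PySem.Str.lower p)
      let exp := PySem.Str.strip (PySem.Str.lower expected)
      pvCanon.getD pred pred == pvCanon.getD exp exp

-- ===== PRECONDITION & SPEC =====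
def Spec_statuses_match_py (predicted : Option String) (expected : String) (out : Bool) : Prop := out = statuses_match_py_alt predicted expected
instance (predicted : Option String) (expected : String) (out : Bool) : Decidable (Spec_statuses_match_py predicted expected out) := by unfold Spec_statuses_match_py; infer_instance

-- ===== CLAIM (what is proved, stated in full; the proofs are below) =====
def Claim_equal_statuses_match_py : Prop := ∀ (predicted : Option String) (expected : String), Dom_statuses_match_py predicted expected → Spec_statuses_match_py predicted expected (statuses_match_py predicted expected)

-- ===== LEMMAS AND PROOFS =====

-- every string is one of the six table keys or none of them
lemma pvClassify (p : String) :
    p = "requires_human_review" ∨ p = "not_covered" ∨ p = "covered" ∨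
    p = "likely_covered" ∨ p = "pend" ∨ p = "conditional" ∨
    (p ≠ "requires_human_review" ∧ p ≠ "not_covered" ∧ p ≠ "covered" ∧
     p ≠ "likely_covered" ∧ p ≠ "pend" ∧ p ≠ "conditional") := by
  tauto

-- the canonical table as a literal item list
lemma pvCanon_items : pvCanon.items =
    [("requires_human_review", "not_covered"), ("not_covered", "not_covered"),
     ("covered", "covered"), ("likely_covered", "covered"),
     ("pend", "conditional"), ("conditional", "conditional")] := by decide

-- a string that is none of the six keys looks itself up to itself
lemma pvGetD_default (p : String) (h1 : p ≠ "requires_human_review") (h2 : p ≠ "not_covered")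
    (h3 : p ≠ "covered") (h4 : p ≠ "likely_covered") (h5 : p ≠ "pend") (h6 : p ≠ "conditional") :
    pvCanon.getD p p = p := by
  have e1 : ("requires_human_review" == p) = false := beq_eq_false_iff_ne.mpr (Ne.symm h1)
  have e2 : ("not_covered" == p) = false := beq_eq_false_iff_ne.mpr (Ne.symm h2)
  have e3 : ("covered" == p) = false := beq_eq_false_iff_ne.mpr (Ne.symm h3)
  have e4 : ("likely_covered" == p) = false := beq_eq_false_iff_ne.mpr (Ne.symm h4)
  have e5 : ("pend" == p) = false := beq_eq_false_iff_ne.mpr (Ne.symm h5)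
  have e6 : ("conditional" == p) = false := beq_eq_false_iff_ne.mpr (Ne.symm h6)
  simp [PySem.Dict.getD, PySem.Dict.get?, pvCanon_items, List.find?, e1, e2, e3, e4, e5, e6]

-- A's loop returns false when the expected side is in no group
lemma pvLoop_false_right (p e : String) (h1 : e ≠ "requires_human_review") (h2 : e ≠ "not_covered")
    (h3 : e ≠ "covered") (h4 : e ≠ "likely_covered") (h5 : e ≠ "pend") (h6 : e ≠ "conditional") :
    pvLoopA pvGroupsA p e = false := by
  simp only [pvLoopA, pvGroupsA, PySem.Set.ofList, PySem.Set.contains]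
  simp
  tauto

-- A's loop returns false when the predicted side is in no group
lemma pvLoop_false_left (p e : String) (h1 : p ≠ "requires_human_review") (h2 : p ≠ "not_covered")
    (h3 : p ≠ "covered") (h4 : p ≠ "likely_covered") (h5 : p ≠ "pend") (h6 : p ≠ "conditional") :
    pvLoopA pvGroupsA p e = false := by
  simp only [pvLoopA, pvGroupsA, PySem.Set.ofList, PySem.Set.contains]
  simp
  tauto

-- A's core (shortcut + group loop) equals B's core (two table lookups)
lemma pvCore_eq (p e : String) :
    (if p == e then true else pvLoopA pvGroupsA p e) =
    (pvCanon.getD p p == pvCanon.getD e e) := by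
  rcases pvClassify p with hp | hp | hp | hp | hp | hp | ⟨hp1, hp2, hp3, hp4, hp5, hp6⟩ <;>
    rcases pvClassify e with he | he | he | he | he | he | ⟨he1, he2, he3, he4, he5, he6⟩ <;>
    first
      | (subst hp; subst he; decide)
      | (subst hp
         rw [pvLoop_false_right _ e he1 he2 he3 he4 he5 he6,
             pvGetD_default e he1 he2 he3 he4 he5 he6]
         simp [PySem.Dict.getD, PySem.Dict.get?, pvCanon_items, List.find?,
           Ne.symm he1, Ne.symm he2, Ne.symm he3, Ne.symm he4, Ne.symm he5, Ne.symm he6])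
      | (subst he
         rw [pvLoop_false_left p _ hp1 hp2 hp3 hp4 hp5 hp6,
             pvGetD_default p hp1 hp2 hp3 hp4 hp5 hp6]
         simp [PySem.Dict.getD, PySem.Dict.get?, pvCanon_items, List.find?,
           hp1, hp2, hp3, hp4, hp5, hp6])
      | (rw [pvLoop_false_right _ e he1 he2 he3 he4 he5 he6,
             pvGetD_default p hp1 hp2 hp3 hp4 hp5 hp6,
             pvGetD_default e he1 he2 he3 he4 he5 he6]
         by_cases h : p = e <;> simp [h])

-- ===== VERDICT (by name: the statement is the Claim_ definition above) =====
theorem statuses_match_py_spec : Claim_equal_statuses_match_py := by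
  intro predicted expected _
  unfold Spec_statuses_match_py statuses_match_py statuses_match_py_alt
  cases predicted with
  | none => rfl
  | some p => exact pvCore_eq _ _
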